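-- pv_equiv track=rewrite | github.com/tkdlek0501/algorithm_python | 12st_week/2025_06_18_delivery_box.py | solution
-- ===== SOURCE A (Python) =====
-- def solution(order):
--     stack = []  # 보조 컨테이너
--     idx = 0  # order에서 다음에 꺼내야 하는 상자 인덱스
--
--     for n in range(1, len(order) + 1):
--         if n == order[idx]:
--             idx += 1
--             # 기본 벨트 상자가 바로 원하는 상자라서 싣기
--             # 싣고 나서 스택 검사하며 잔고 처리하기
--             while stack and stack[-1] == order[idx]:
--                 stack.pop()
--                 idx += 1
--         else:
--             # 기본 벨트 상자가 원하는 순서가 아니면 보조 벨트에 저장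
--             stack.append(n)
--
--     return idx
-- ===== SOURCE B (Python) =====
-- def solution(order):
--     stack = []
--     belt = 1
--     count = 0
--     n_total = len(order)
--     for target in order:
--         if stack and stack[-1] == target:
--             stack.pop()
--             count += 1
--         else:
--             while belt <= n_total and belt != target:
--                 stack.append(belt)
--                 belt += 1
--             if belt <= n_total:
--                 belt += 1
--                 count += 1
--             else:
--                 break
--     return count
-- ===== Notes on version B (the rewrite author's own statement) =====
-- stated objective: alternative
-- what changed: B inverts the loop structure: instead of iterating the conveyor belt 1..n and indexing into order (A), B iterates the wanted sequence order and advances an integer belt pointer on demand, pushing skipped boxes on the auxiliary stack and breaking when the belt is exhausted.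
import Mathlib
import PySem

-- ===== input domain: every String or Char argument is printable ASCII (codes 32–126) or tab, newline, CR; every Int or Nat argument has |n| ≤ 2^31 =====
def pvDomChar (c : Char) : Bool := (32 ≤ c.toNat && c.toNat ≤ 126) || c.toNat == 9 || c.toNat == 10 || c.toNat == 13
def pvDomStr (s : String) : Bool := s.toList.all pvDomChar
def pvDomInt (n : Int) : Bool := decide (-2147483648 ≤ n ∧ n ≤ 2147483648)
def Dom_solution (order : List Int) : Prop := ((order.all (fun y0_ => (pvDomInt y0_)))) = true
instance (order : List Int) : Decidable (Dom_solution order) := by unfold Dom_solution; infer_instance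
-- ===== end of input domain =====

-- B inverts the loop structure of A (iterate the wanted sequence and advance the belt on demand,
-- instead of iterating the belt and indexing into the wanted sequence); objective: alternative, same cost.

-- ===== PORT A =====
-- the Python stack appends/pops at the end; we model it with the head as the top.
-- inner while: `while stack and stack[-1] == order[idx]: stack.pop(); idx += 1`
def pvPopA (order : List Int) : List Int → Int → List Int × Int
  | [], idx => ([], idx)
  | top :: rest, idx =>
    if PySem.List.pyGet? order idx = some top then pvPopA order rest (idx + 1)
    else (top :: rest, idx)

-- one iteration of `for n in range(1, len(order)+1)` over the state (stack, idx)
def pvStepA (order : List Int) (st : List Int × Int) (n : Int) : List Int × Int :=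
  if PySem.List.pyGet? order st.2 = some n then pvPopA order st.1 (st.2 + 1)
  else (n :: st.1, st.2)

def solution (order : List Int) : Int :=
  ((PySem.List.pyRange 1 ((order.length : Int) + 1) 1).foldl (pvStepA order) ([], 0)).2

-- ===== PORT B =====
-- `while belt <= n_total and belt != target: stack.append(belt); belt += 1`
def pvAdvanceB (N target belt : Int) (stack : List Int) : Int × List Int :=
  if h : belt ≤ N ∧ belt ≠ target then pvAdvanceB N target (belt + 1) (belt :: stack)
  else (belt, stack)
termination_by (N + 1 - belt).toNat
decreasing_by omega

-- `for target in order:` with state (stack, belt, count); returning count models `break`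
def pvRunB (N : Int) : List Int → List Int → Int → Int → Int
  | [], _stack, _belt, count => count
  | target :: rest, stack, belt, count =>
    if stack.head? = some target then
      pvRunB N rest stack.tail belt (count + 1)
    else
      let r := pvAdvanceB N target belt stack
      if r.1 ≤ N then pvRunB N rest r.2 (r.1 + 1) (count + 1) else count

def solution_alt (order : List Int) : Int :=
  pvRunB (order.length : Int) order [] 1 0

-- ===== PRECONDITION & SPEC =====
def Spec_solution (order : List Int) (out : Int) : Prop := out = solution_alt order
instance (order : List Int) (out : Int) : Decidable (Spec_solution order out) := by unfold Spec_solution; infer_instance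

-- ===== CLAIM (what is proved, stated in full; the proofs are below) =====
def Claim_equal_solution : Prop := ∀ (order : List Int), Dom_solution order → Spec_solution order (solution order)

-- ===== LEMMAS AND PROOFS =====

-- A's inner pop-loop, run from a count j, lands in a "settled" state (top ≠ next wanted box)
-- and performs exactly the pops B performs in its successive `stack[-1] == target` iterations.
theorem pvPopA_runB (order : List Int) (N : Int) :
    ∀ (stack : List Int) (j : Nat) (belt : Int),
      ∃ (j' : Nat) (stack' : List Int),
        pvPopA order stack (j : Int) = (stack', (j' : Int)) ∧ j ≤ j' ∧
        (∀ t, stack'.head? = some t → order[j']? ≠ some t) ∧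
        pvRunB N (order.drop j) stack belt (j : Int)
          = pvRunB N (order.drop j') stack' belt (j' : Int) := by
  intro stack
  induction stack with
  | nil =>
    intro j belt
    exact ⟨j, [], rfl, le_rfl, by simp, rfl⟩
  | cons top rest ih =>
    intro j belt
    by_cases h : order[j]? = some top
    · obtain ⟨j', stack', hpop, hle, hset, hrun⟩ := ih (j + 1) belt
      refine ⟨j', stack', ?_, by omega, hset, ?_⟩
      · rw [pvPopA]
        simp only [PySem.List.pyGet?_natCast, h]
        rw [show ((j : Int) + 1) = ((j + 1 : Nat) : Int) by push_cast; ring]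
        exact hpop
      · have hj : j < order.length := by
          by_contra hc
          rw [List.getElem?_eq_none (Nat.le_of_not_lt hc)] at h
          simp at h
        have hdrop : order.drop j = order[j] :: order.drop (j + 1) :=
          List.drop_eq_getElem_cons hj
        have htop : order[j] = top := by
          have := List.getElem?_eq_getElem hj
          rw [this] at h; exact (Option.some.injEq _ _).mp h
        rw [hdrop, htop, pvRunB]
        simp only [List.head?_cons, List.tail_cons]
        rw [show ((j : Int) + 1) = ((j + 1 : Nat) : Int) by push_cast; ring]
        exact hrun
    · refine ⟨j, top :: rest, ?_, le_rfl, ?_, rfl⟩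
      · rw [pvPopA]
        simp [h]
      · intro t ht
        simp only [List.head?_cons, Option.some.injEq] at ht
        rw [← ht]; exact h

-- if the wanted index is exhausted, A's remaining belt iterations only push and never change idx
theorem pvFoldA_none (order : List Int) (j : Nat) (hj : order[j]? = none) :
    ∀ (l : List Int) (stack : List Int),
      (l.foldl (pvStepA order) (stack, (j : Int))).2 = (j : Int) := by
  intro l
  induction l with
  | nil => intro stack; rfl
  | cons n l ih =>
    intro stack
    have : pvStepA order (stack, (j : Int)) n = (n :: stack, (j : Int)) := by
      rw [pvStepA]
      simp [hj]
    rw [List.foldl_cons, this, ih]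

-- main bridge: from any settled state, A's remaining belt fold and B's remaining target loop agree
theorem pvMain (order : List Int) :
    ∀ (fuel j : Nat) (belt : Int) (stack : List Int),
      (order.length - j) + ((order.length : Int) + 1 - belt).toNat ≤ fuel →
      (∀ t, stack.head? = some t → order[j]? ≠ some t) →
      ((PySem.List.pyRange belt ((order.length : Int) + 1) 1).foldl
          (pvStepA order) (stack, (j : Int))).2
        = pvRunB (order.length : Int) (order.drop j) stack belt (j : Int) := by
  intro fuel
  induction fuel with
  | zero =>
    intro j belt stack hfuel _
    have hj : order.length ≤ j := by omega
    have hb : (order.length : Int) + 1 ≤ belt := by omega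
    rw [PySem.List.pyRange_one]
    rw [show ((order.length : Int) + 1 - belt).toNat = 0 by omega]
    simp only [List.range_zero, List.map_nil, List.foldl_nil]
    rw [List.drop_eq_nil_of_le hj, pvRunB]
  | succ fuel ih =>
    intro j belt stack hfuel hset
    by_cases hj : order.length ≤ j
    · -- no more wanted boxes: A keeps pushing, B's list is exhausted
      have hnone : order[j]? = none := List.getElem?_eq_none hj
      rw [pvFoldA_none order j hnone, List.drop_eq_nil_of_le hj, pvRunB]
    · rw [Nat.not_le] at hj
      have ht : order[j]? = some order[j] := List.getElem?_eq_getElem hj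
      set target := order[j] with htarget
      have hdrop : order.drop j = target :: order.drop (j + 1) :=
        List.drop_eq_getElem_cons hj
      have hhead : ¬ stack.head? = some target := by
        intro hc
        exact hset target hc ht
      by_cases hb : belt ≤ (order.length : Int)
      · by_cases he : belt = target
        · -- A loads belt box and runs its pop loop; B loads it and pops in later iterations
          rw [PySem.List.pyRange_one_cons (by omega)]
          rw [List.foldl_cons]
          have hstep : pvStepA order (stack, (j : Int)) belt = pvPopA order stack ((j : Int) + 1) := by
            rw [pvStepA]
            simp only [PySem.List.pyGet?_natCast]
            rw [if_pos (by rw [ht, he])]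
          obtain ⟨j', stack', hpop, hle, hset', hrun⟩ :=
            pvPopA_runB order (order.length : Int) stack (j + 1) (belt + 1)
          rw [hstep, show ((j : Int) + 1) = ((j + 1 : Nat) : Int) by push_cast; ring, hpop]
          rw [ih j' (belt + 1) stack' (by omega) hset']
          rw [hdrop, pvRunB]
          simp only [if_neg hhead]
          rw [pvAdvanceB]
          rw [dif_neg (by simp [he])]
          simp only [if_pos hb]
          rw [show ((j : Int) + 1) = ((j + 1 : Nat) : Int) by push_cast; ring]
          exact hrun.symm
        · -- belt box is not wanted: both sides push it and advance the belt
          rw [PySem.List.pyRange_one_cons (by omega)]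
          rw [List.foldl_cons]
          have hstep : pvStepA order (stack, (j : Int)) belt = (belt :: stack, (j : Int)) := by
            rw [pvStepA]
            simp only [PySem.List.pyGet?_natCast]
            rw [if_neg (by rw [ht]; simpa using fun hc => he hc.symm)]
          rw [hstep, ih j (belt + 1) (belt :: stack) (by omega)
              (by intro t htt; simp only [List.head?_cons, Option.some.injEq] at htt
                  rw [ht, ← htt]; simpa using fun hc => he hc.symm)]
          rw [hdrop, pvRunB, pvRunB]
          simp only [if_neg hhead]
          have : ¬ (belt :: stack).head? = some target := by simp [he]
          simp only [if_neg this]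
          rw [show pvAdvanceB (order.length : Int) target belt stack
                = pvAdvanceB (order.length : Int) target (belt + 1) (belt :: stack) by
              rw [pvAdvanceB]; rw [dif_pos ⟨hb, he⟩]]
      · -- belt exhausted: A's fold is empty; B's advance overflows and breaks
        rw [PySem.List.pyRange_one]
        rw [show ((order.length : Int) + 1 - belt).toNat = 0 by omega]
        simp only [List.range_zero, List.map_nil, List.foldl_nil]
        rw [hdrop, pvRunB]
        simp only [if_neg hhead]
        rw [pvAdvanceB, dif_neg (by intro hc; exact hb hc.1)]
        simp only []
        rw [if_neg hb]

-- ===== VERDICT (by name: the statement is the Claim_ definition above) =====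
theorem solution_spec : Claim_equal_solution := by
  intro order _
  unfold Spec_solution solution solution_alt
  have := pvMain order (order.length + ((order.length : Int) + 1 - 1).toNat) 0 1 []
    (by omega) (by simp)
  simpa using this
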